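-- pv_equiv track=rewrite | github.com/gyeomh/LEGO-EVAL | preprocess/adj_functions.py | get_object_list
-- ===== SOURCE A (Python) =====
-- def get_object_list(scene: dict, roomId: list) -> dict:
--
--     object_list = {}
--     for room in roomId:
--         object_list[room] = []
--     for obj in scene.get("objects", []):
--         if obj["roomId"] in roomId:
--             object_list[obj["roomId"]].append(obj["id"])
--     return object_list
-- ===== SOURCE B (Python) =====
-- def get_object_list(scene: dict, roomId: list) -> dict:
--     objects = scene.get("objects", [])
--     object_list = {}
--     for room in roomId:
--         object_list[room] = [obj["id"] for obj in objects if obj["roomId"] == room]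
--     return object_list
-- ===== Notes on version B (the rewrite author's own statement) =====
-- stated objective: simpler
-- what changed: B inverts the loop structure: instead of A's initialization pass over roomId followed by a single pass over objects appending into the dict, B loops over roomId and builds each room's id list by a fresh comprehension scan over the objects, with no membership test and no append.
import Mathlib
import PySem

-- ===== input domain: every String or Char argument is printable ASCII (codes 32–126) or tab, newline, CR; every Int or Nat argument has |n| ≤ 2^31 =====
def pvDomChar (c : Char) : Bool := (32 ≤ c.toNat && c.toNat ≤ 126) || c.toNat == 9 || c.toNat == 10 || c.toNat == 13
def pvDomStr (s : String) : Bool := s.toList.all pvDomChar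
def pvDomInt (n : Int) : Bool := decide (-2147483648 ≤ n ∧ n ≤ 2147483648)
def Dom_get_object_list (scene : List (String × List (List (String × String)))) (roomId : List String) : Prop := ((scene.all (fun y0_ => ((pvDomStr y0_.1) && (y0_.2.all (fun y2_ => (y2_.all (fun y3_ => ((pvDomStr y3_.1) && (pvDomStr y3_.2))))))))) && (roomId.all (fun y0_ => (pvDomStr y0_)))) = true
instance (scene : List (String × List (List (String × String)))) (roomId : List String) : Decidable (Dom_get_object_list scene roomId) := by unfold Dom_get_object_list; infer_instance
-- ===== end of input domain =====

-- B inverts A's loop structure (outer loop over rooms, one object scan per room, no membership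
-- test, no appends) — objective: simpler; same cost class, not claimed faster.

-- shared accessors for the Python dict lookups both sources write identically
-- scene.get("objects", [])
def pvObjects (scene : List (String × List (List (String × String)))) : List (List (String × String)) :=
  (PySem.Dict.mk scene).getD "objects" []
-- obj["roomId"]  (Pre_ guarantees the key is present wherever the Pythons read it)
def pvRoom (obj : List (String × String)) : String := (PySem.Dict.mk obj).getD "roomId" ""
-- obj["id"]
def pvId (obj : List (String × String)) : String := (PySem.Dict.mk obj).getD "id" ""

-- ===== PORT A =====
def get_object_list (scene : List (String × List (List (String × String)))) (roomId : List String) : List (String × List String) :=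
  let init : PySem.Dict String (List String) :=
    roomId.foldl (fun d room => d.insert room []) PySem.Dict.empty
  let fin :=
    (pvObjects scene).foldl (fun d obj =>
      if pvRoom obj ∈ roomId then
        d.modify (pvRoom obj) [] (fun v => v ++ [pvId obj])   -- object_list[obj["roomId"]].append(obj["id"])
      else d) init
  fin.items

-- ===== PORT B =====
def get_object_list_alt (scene : List (String × List (List (String × String)))) (roomId : List String) : List (String × List String) :=
  let objects := pvObjects scene
  (roomId.foldl (fun d room =>
      d.insert room ((objects.filter (fun obj => pvRoom obj == room)).map pvId))
    PySem.Dict.empty).items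

-- ===== PRECONDITION & SPEC =====
-- Pre_ excludes exactly the KeyError inputs: every object must carry "roomId" (A reads it for
-- every object) and, when that room is listed in roomId, also "id".
def Pre_get_object_list (scene : List (String × List (List (String × String)))) (roomId : List String) : Prop :=
  ∀ obj ∈ pvObjects scene, (PySem.Dict.mk obj).contains "roomId" = true ∧
    (pvRoom obj ∈ roomId → (PySem.Dict.mk obj).contains "id" = true)
instance (scene : List (String × List (List (String × String)))) (roomId : List String) : Decidable (Pre_get_object_list scene roomId) := by unfold Pre_get_object_list; infer_instance
def pvWitness_get_object_list : (List (String × List (List (String × String)))) × List String :=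
  ([("objects", [[("roomId", "r1"), ("id", "a")], [("roomId", "r2"), ("id", "b")]])], ["r1", "r2"])

def Spec_get_object_list (scene : List (String × List (List (String × String)))) (roomId : List String) (out : List (String × List String)) : Prop := out = get_object_list_alt scene roomId
instance (scene : List (String × List (List (String × String)))) (roomId : List String) (out : List (String × List String)) : Decidable (Spec_get_object_list scene roomId out) := by unfold Spec_get_object_list; infer_instance

-- ===== CLAIM (what is proved, stated in full; the proofs are below) =====
def Claim_equal_get_object_list : Prop := ∀ (scene : List (String × List (List (String × String)))) (roomId : List String), Dom_get_object_list scene roomId → Pre_get_object_list scene roomId → Spec_get_object_list scene roomId (get_object_list scene roomId)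
-- ===== LEMMAS AND PROOFS =====

theorem pv_init_getD (rs : List String) (r : String) (d : PySem.Dict String (List String))
    (h : d.getD r [] = []) :
    ((rs.foldl (fun d x => d.insert x []) d).getD r []) = [] := by
  induction rs generalizing d with
  | nil => simpa using h
  | cons x rest ih =>
    simp only [List.foldl_cons]
    apply ih
    rw [PySem.Dict.getD_insert]
    split <;> simp [h]

theorem pv_objloop_getD (roomId : List String) (objs : List (List (String × String)))
    (r : String) (hr : r ∈ roomId) (d : PySem.Dict String (List String)) :
    ((objs.foldl (fun d obj =>
        if pvRoom obj ∈ roomId then d.modify (pvRoom obj) [] (fun v => v ++ [pvId obj]) else d) d).getD r [])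
      = d.getD r [] ++ (objs.filter (fun o => pvRoom o == r)).map pvId := by
  induction objs generalizing d with
  | nil => simp
  | cons o rest ih =>
    simp only [List.foldl_cons, List.filter_cons]
    by_cases he : pvRoom o = r
    · rw [he]
      simp only [if_pos hr, beq_self_eq_true, if_pos]
      rw [ih _ ]
      rw [PySem.Dict.getD_modify_self]
      simp
    · have hne : (pvRoom o == r) = false := by simpa using he
      rw [hne]
      simp only [Bool.false_eq_true]
      by_cases hg : pvRoom o ∈ roomId
      · rw [if_pos hg, ih _, PySem.Dict.getD_modify_of_ne _ _ _ (Ne.symm he)]; simp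
      · rw [if_neg hg, ih _]; simp

theorem pv_objloop_keys (roomId : List String) (objs : List (List (String × String)))
    (d : PySem.Dict String (List String)) (h : ∀ r ∈ roomId, r ∈ d.keys) :
    ((objs.foldl (fun d obj =>
        if pvRoom obj ∈ roomId then d.modify (pvRoom obj) [] (fun v => v ++ [pvId obj]) else d) d).keys)
      = d.keys := by
  induction objs generalizing d with
  | nil => rfl
  | cons o rest ih =>
    simp only [List.foldl_cons]
    by_cases hg : pvRoom o ∈ roomId
    · rw [if_pos hg]
      have hc : d.contains (pvRoom o) = true := (PySem.Dict.contains_iff_mem_keys d _).mpr (h _ hg)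
      have hk : (d.modify (pvRoom o) [] (fun v => v ++ [pvId o])).keys = d.keys := by
        rw [PySem.Dict.keys_modify, PySem.Dict.keys_insert_of_contains _ _ hc]
      rw [ih _ (fun r hrm => hk ▸ h r hrm), hk]
    · rw [if_neg hg, ih _ h]

theorem pv_b_getD_not_mem (g : String → List String) (rs : List String) (r : String)
    (hr : r ∉ rs) (d : PySem.Dict String (List String)) :
    ((rs.foldl (fun d x => d.insert x (g x)) d).getD r []) = d.getD r [] := by
  induction rs generalizing d with
  | nil => rfl
  | cons x rest ih =>
    simp only [List.mem_cons, not_or] at hr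
    simp only [List.foldl_cons]
    rw [ih hr.2, PySem.Dict.getD_insert]
    simp [hr.1]

theorem pv_b_getD (g : String → List String) (rs : List String) (r : String)
    (hr : r ∈ rs) (d : PySem.Dict String (List String)) :
    ((rs.foldl (fun d x => d.insert x (g x)) d).getD r []) = g r := by
  induction rs generalizing d with
  | nil => simp at hr
  | cons x rest ih =>
    simp only [List.foldl_cons]
    by_cases hm : r ∈ rest
    · exact ih hm _
    · rcases List.mem_cons.mp hr with h | h
      · subst h
        rw [pv_b_getD_not_mem g rest r hm, PySem.Dict.getD_insert]
        simp
      · exact absurd h hm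

-- the two ports compute the same items list
theorem pv_main (scene : List (String × List (List (String × String)))) (roomId : List String) :
    get_object_list scene roomId = get_object_list_alt scene roomId := by
  unfold get_object_list get_object_list_alt
  set init : PySem.Dict String (List String) :=
    roomId.foldl (fun d room => d.insert room []) PySem.Dict.empty with hinit
  set finA :=
    (pvObjects scene).foldl (fun d obj =>
      if pvRoom obj ∈ roomId then d.modify (pvRoom obj) [] (fun v => v ++ [pvId obj]) else d) init with hfinA
  set finB :=
    roomId.foldl (fun d room =>
      d.insert room (((pvObjects scene).filter (fun obj => pvRoom obj == room)).map pvId))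
      PySem.Dict.empty with hfinB
  have hkinit : init.keys = PySem.Set.update [] roomId :=
    PySem.Dict.keys_foldl_insert roomId (fun _ _ => []) PySem.Dict.empty
  have hmem : ∀ r ∈ roomId, r ∈ init.keys := by
    intro r hr
    rw [hkinit, PySem.Set.update_nil_left, PySem.Set.mem_ofList]
    exact hr
  have hkA : finA.keys = init.keys := pv_objloop_keys roomId (pvObjects scene) init hmem
  have hkB : finB.keys = PySem.Set.update [] roomId :=
    PySem.Dict.keys_foldl_insert roomId _ PySem.Dict.empty
  have hndB : finB.keys.Nodup :=
    PySem.Dict.nodup_keys_foldl_insert roomId _ PySem.Dict.empty PySem.Dict.nodup_keys_empty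
  have hndinit : init.keys.Nodup :=
    PySem.Dict.nodup_keys_foldl_insert roomId _ PySem.Dict.empty PySem.Dict.nodup_keys_empty
  have hndA : finA.keys.Nodup := hkA ▸ hndinit
  rw [PySem.Dict.items_eq_map_keys finA hndA [], PySem.Dict.items_eq_map_keys finB hndB []]
  rw [hkA, hkinit, hkB]
  apply List.map_congr_left
  intro r hrmem
  have hr : r ∈ roomId := by
    rw [PySem.Set.update_nil_left, PySem.Set.mem_ofList] at hrmem; exact hrmem
  have hA : finA.getD r [] = ((pvObjects scene).filter (fun o => pvRoom o == r)).map pvId := by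
    rw [hfinA, pv_objloop_getD roomId _ r hr init,
      pv_init_getD roomId r PySem.Dict.empty (by simp [PySem.Dict.getD_empty])]
    simp
  have hB : finB.getD r [] = ((pvObjects scene).filter (fun o => pvRoom o == r)).map pvId :=
    pv_b_getD (fun room => ((pvObjects scene).filter (fun obj => pvRoom obj == room)).map pvId)
      roomId r hr PySem.Dict.empty
  rw [hA, hB]

-- ===== VERDICT (by name: the statement is the Claim_ definition above) =====
theorem get_object_list_spec : Claim_equal_get_object_list := by
  intro scene roomId _ _
  unfold Spec_get_object_list
  exact pv_main scene roomId
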